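-- pv_equiv track=rewrite | github.com/an-erd/AgenticRun | app.py | _structured_comparison_verdict
-- ===== SOURCE A (Python) =====
-- def _structured_comparison_verdict(bits: dict[str, str]) -> str:
--     good = sum(1 for v in bits.values() if v == "improved")
--     bad = sum(1 for v in bits.values() if v in {"softened", "higher"})
--     if good >= 2 and bad == 0:
--         return "improved versus last similar workout"
--     if bad >= 2 and good == 0:
--         return "softened versus last similar workout"
--     return "consolidated versus last similar workout"
-- ===== SOURCE B (Python) =====
-- def _structured_comparison_verdict(bits: dict[str, str]) -> str:
--     score = {"improved": 1, "softened": -1, "higher": -1}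
--     s = [score.get(v, 0) for v in bits.values()]
--     total = sum(s)
--     if total >= 2 and all(x >= 0 for x in s):
--         return "improved versus last similar workout"
--     if total <= -2 and all(x <= 0 for x in s):
--         return "softened versus last similar workout"
--     return "consolidated versus last similar workout"
-- ===== Notes on version B (the rewrite author's own statement) =====
-- stated objective: alternative
-- what changed: Replaces A's two filtered counting scans and count-threshold tests with a signed-score formulation: each value maps to +1/-1/0, and the verdict is decided from the score total together with a sign (all-nonnegative / all-nonpositive) check.
import Mathlib
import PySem

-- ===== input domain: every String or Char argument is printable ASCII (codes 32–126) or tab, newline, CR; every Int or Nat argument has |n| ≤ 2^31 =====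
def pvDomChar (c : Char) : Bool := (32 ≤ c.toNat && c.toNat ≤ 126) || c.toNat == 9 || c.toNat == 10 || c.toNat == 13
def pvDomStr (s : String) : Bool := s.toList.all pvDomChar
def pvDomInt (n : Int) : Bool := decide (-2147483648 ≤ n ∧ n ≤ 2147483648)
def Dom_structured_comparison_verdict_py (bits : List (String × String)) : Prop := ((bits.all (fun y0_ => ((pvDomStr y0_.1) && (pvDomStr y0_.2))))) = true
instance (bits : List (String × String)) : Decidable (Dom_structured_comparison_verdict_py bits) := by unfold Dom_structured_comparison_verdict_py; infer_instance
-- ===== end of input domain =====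

-- B replaces A's two counting scans and count-threshold tests with a signed-score list (+1/-1/0) judged by its total and a sign check (alternative formulation; same O(n) cost).

-- ===== PORT A =====
-- good = sum(1 for v in bits.values() if v == "improved"); bad = sum(1 for v ... if v in {"softened","higher"})
def structured_comparison_verdict_py (bits : List (String × String)) : String :=
  let values := bits.map (fun p => p.2)
  let good : Int := ((values.filter (fun v => v == "improved")).map (fun _ => (1 : Int))).sum
  let bad : Int := ((values.filter (fun v => v == "softened" || v == "higher")).map (fun _ => (1 : Int))).sum
  if good ≥ 2 ∧ bad = 0 then "improved versus last similar workout"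
  else if bad ≥ 2 ∧ good = 0 then "softened versus last similar workout"
  else "consolidated versus last similar workout"

-- ===== PORT B =====
-- score = {"improved": 1, "softened": -1, "higher": -1}; s = [score.get(v,0) for v in bits.values()]
-- total = sum(s); total>=2 and all(x>=0 for x in s) → improved; total<=-2 and all(x<=0 for x in s) → softened; else consolidated
def structured_comparison_verdict_py_alt (bits : List (String × String)) : String :=
  let score : PySem.Dict String Int :=
    PySem.Dict.ofList [("improved", 1), ("softened", -1), ("higher", -1)]
  let s : List Int := bits.map (fun p => score.getD p.2 0)
  let total : Int := s.sum
  if total ≥ 2 ∧ s.all (fun x => decide (x ≥ 0)) then "improved versus last similar workout"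
  else if total ≤ -2 ∧ s.all (fun x => decide (x ≤ 0)) then "softened versus last similar workout"
  else "consolidated versus last similar workout"

-- ===== PRECONDITION & SPEC =====
def Spec_structured_comparison_verdict_py (bits : List (String × String)) (out : String) : Prop := out = structured_comparison_verdict_py_alt bits
instance (bits : List (String × String)) (out : String) : Decidable (Spec_structured_comparison_verdict_py bits out) := by unfold Spec_structured_comparison_verdict_py; infer_instance

-- ===== CLAIM =====
def Claim_equal_structured_comparison_verdict_py : Prop := ∀ (bits : List (String × String)), Dom_structured_comparison_verdict_py bits → Spec_structured_comparison_verdict_py bits (structured_comparison_verdict_py bits)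

-- ===== LEMMAS AND PROOFS =====

-- proof-only abbreviations: B's score function (the if-chain the dict lookup denotes)
def pvScore (v : String) : Int :=
  if v = "improved" then 1 else if v = "softened" then -1 else if v = "higher" then -1 else 0

-- the literal score dict looked up at any key is the if-chain pvScore
theorem score_eval (v : String) :
    (PySem.Dict.ofList [("improved",(1:Int)),("softened",-1),("higher",-1)]).getD v 0 = pvScore v := by
  unfold pvScore
  simp only [PySem.Dict.ofList, PySem.Dict.getD, PySem.Dict.update, PySem.Dict.insert,
    PySem.Dict.empty, List.foldl]
  by_cases h1 : v = "improved" <;> by_cases h2 : v = "softened" <;> by_cases h3 : v = "higher" <;>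
    simp_all [PySem.Dict.get?, Ne.symm]

-- A's 0/1-sum over a filter is the count of matching elements
theorem sum_ones_filter_eq_count (l : List String) (p : String → Bool) :
    (((l.filter p).map (fun _ => (1 : Int))).sum) = ((l.countP p : Nat) : Int) := by
  induction l with
  | nil => simp
  | cons x xs ih =>
    simp only [List.filter_cons, List.countP_cons]
    split <;> simp_all <;> omega

-- the score total is good minus bad
theorem sum_scores (l : List String) :
    (l.map pvScore).sum =
      (l.countP (fun v => v == "improved") : Int) -
        (l.countP (fun v => v == "softened" || v == "higher") : Int) := by
  induction l with
  | nil => simp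
  | cons x xs ih =>
    simp only [pvScore, List.map_cons, List.countP_cons, List.sum_cons] at *
    by_cases h1 : x = "improved"
    · simp [h1]; omega
    · by_cases h2 : x = "softened"
      · simp [h1, h2]; omega
      · by_cases h3 : x = "higher"
        · simp [h1, h2, h3]; omega
        · simp [h1, h2, h3]; omega

-- all scores nonnegative ⟺ no bad entry
theorem all_nonneg_scores (l : List String) :
    (l.map pvScore).all (fun x => decide (x ≥ 0)) =
      decide (l.countP (fun v => v == "softened" || v == "higher") = 0) := by
  induction l with
  | nil => simp
  | cons x xs ih =>
    simp only [pvScore, List.map_cons, List.countP_cons, List.all_cons] at *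
    by_cases h1 : x = "improved"
    · simp [h1, ih]
    · by_cases h2 : x = "softened"
      · simp [h1, h2]
      · by_cases h3 : x = "higher"
        · simp [h1, h2, h3]
        · simp [h1, h2, h3, ih]

-- all scores nonpositive ⟺ no good entry
theorem all_nonpos_scores (l : List String) :
    (l.map pvScore).all (fun x => decide (x ≤ 0)) =
      decide (l.countP (fun v => v == "improved") = 0) := by
  induction l with
  | nil => simp
  | cons x xs ih =>
    simp only [pvScore, List.map_cons, List.countP_cons, List.all_cons] at *
    by_cases h1 : x = "improved"
    · simp [h1]
    · by_cases h2 : x = "softened"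
      · simp [h1, h2, ih]
      · by_cases h3 : x = "higher"
        · simp [h1, h2, h3, ih]
        · simp [h1, h2, h3, ih]

-- ===== VERDICT =====
theorem structured_comparison_verdict_py_spec : Claim_equal_structured_comparison_verdict_py := by
  intro bits _
  unfold Spec_structured_comparison_verdict_py structured_comparison_verdict_py structured_comparison_verdict_py_alt
  have hmap : bits.map (fun p => (PySem.Dict.ofList
      [("improved",(1:Int)),("softened",-1),("higher",-1)]).getD p.2 0) =
      (bits.map (fun p => p.2)).map pvScore := by
    rw [List.map_map]
    exact List.map_congr_left (fun p _ => score_eval p.2)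
  simp only [hmap, sum_ones_filter_eq_count, sum_scores, all_nonneg_scores,
    all_nonpos_scores, decide_eq_true_eq]
  refine if_congr (by omega) rfl (if_congr (by omega) rfl rfl)
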